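-- pv_equiv track=rewrite | github.com/stone-technologies/ACL_budget_paper | full_budgeter.py | lead_selector
-- ===== SOURCE A (Python) =====
-- def wc(x):
--     return len(x.split()) if isinstance(x, str) else 0
--
-- def lead_selector(units, B):
--     out = []
--     L = 0
--     for u in units:
--         lu = wc(u)
--         if L + lu <= B:
--             out.append(u)
--             L += lu
--         else:
--             break
--     return " ".join(out)
-- ===== SOURCE B (Python) =====
-- def wc(x):
--     return len(x.split()) if isinstance(x, str) else 0
--
-- def lead_selector(units, B):
--     # Prefix sums + binary search: word counts are non-negative, so the
--     # cumulative sums are non-decreasing and the greedy prefix is the largest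
--     # n with pre[n] <= B, found by binary search instead of a linear scan.
--     units = list(units)
--     pre = [0] * (len(units) + 1)
--     for i, u in enumerate(units):
--         pre[i + 1] = pre[i] + wc(u)
--     lo, hi = 0, len(units)
--     while lo < hi:
--         mid = (lo + hi + 1) // 2
--         if pre[mid] <= B:
--             lo = mid
--         else:
--             hi = mid - 1
--     return " ".join(units[:lo])
-- ===== Notes on version B (the rewrite author's own statement) =====
-- stated objective: alternative
-- what changed: Replaces the single-pass greedy loop with break by a two-stage algorithm: build an explicit prefix-sum array of word counts, then binary-search it for the largest prefix length whose total fits the budget (correct because word counts are non-negative, so the prefix sums are monotone).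
import Mathlib
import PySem

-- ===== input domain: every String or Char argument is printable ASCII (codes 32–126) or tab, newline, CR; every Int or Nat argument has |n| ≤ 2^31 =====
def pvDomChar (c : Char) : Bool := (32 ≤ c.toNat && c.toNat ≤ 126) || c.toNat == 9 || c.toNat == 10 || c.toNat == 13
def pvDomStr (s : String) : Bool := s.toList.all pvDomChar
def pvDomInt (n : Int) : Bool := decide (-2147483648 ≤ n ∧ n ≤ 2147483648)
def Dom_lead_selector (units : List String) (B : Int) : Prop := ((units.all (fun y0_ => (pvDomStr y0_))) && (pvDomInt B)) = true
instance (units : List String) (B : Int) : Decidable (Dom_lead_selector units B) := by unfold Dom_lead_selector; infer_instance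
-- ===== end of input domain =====

-- ===== PORT A =====
-- B swaps the greedy break-loop for prefix sums plus a binary search; same result, different decomposition.
-- port of wc (units are strings, so the isinstance branch is always taken)
def pvWc (u : String) : Int := ((PySem.Str.split₀ u).length : Int)

-- the for-loop of A with its two pieces of state (out, L) and the break
def pvLeadLoop (B : Int) : List String → List String → Int → List String
  | [], out, _ => out
  | u :: rest, out, L =>
      let lu := pvWc u
      if L + lu ≤ B then pvLeadLoop B rest (out ++ [u]) (L + lu) else out

def lead_selector (units : List String) (B : Int) : String :=
  PySem.Str.join " " (pvLeadLoop B units [] 0)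

-- ===== PORT B =====
-- the prefix-sum array pre (pre[0] = s, pre[i+1] = pre[i] + wc(units[i])), built by Source B's fill loop
def pvPreFrom (s : Int) : List String → List Int
  | [] => [s]
  | u :: rest => s :: pvPreFrom (s + pvWc u) rest

-- Source B's while-loop binary search; lo, hi are non-negative Python ints, so Nat with
-- Nat division matches Python's (lo + hi + 1) // 2 exactly here
-- the while-loop runs at most hi - lo iterations (hi - lo strictly shrinks), so that
-- count is passed as structural fuel; the loop body is unchanged
def pvBSGo (pre : List Int) (B : Int) : Nat → Nat → Nat → Nat
  | 0, lo, _ => lo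
  | fuel + 1, lo, hi =>
      if lo < hi then
        let mid := (lo + hi + 1) / 2
        if pre.getD mid 0 ≤ B then pvBSGo pre B fuel mid hi else pvBSGo pre B fuel lo (mid - 1)
      else lo

def pvBS (pre : List Int) (B : Int) (lo hi : Nat) : Nat := pvBSGo pre B (hi - lo) lo hi

def lead_selector_alt (units : List String) (B : Int) : String :=
  let pre := pvPreFrom 0 units
  let n := pvBS pre B 0 units.length
  PySem.Str.join " " (units.take n)

-- ===== PRECONDITION & SPEC =====
def Spec_lead_selector (units : List String) (B : Int) (out : String) : Prop := out = lead_selector_alt units B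
instance (units : List String) (B : Int) (out : String) : Decidable (Spec_lead_selector units B out) := by unfold Spec_lead_selector; infer_instance

-- ===== CLAIM (what is proved, stated in full; the proofs are below) =====
def Claim_equal_lead_selector : Prop := ∀ (units : List String) (B : Int), Dom_lead_selector units B → Spec_lead_selector units B (lead_selector units B)

-- ===== LEMMAS AND PROOFS =====
-- itertools-style running sums, used only to state the common greedy prefix length
def pvAccum (s : Int) : List Int → List Int
  | [] => []
  | x :: xs => (s + x) :: pvAccum (s + x) xs

theorem pvLeadLoop_eq (B : Int) (units : List String) :
    ∀ (out : List String) (L : Int),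
      pvLeadLoop B units out L =
        out ++ units.take (((pvAccum L (units.map pvWc)).takeWhile (fun c => decide (c ≤ B))).length) := by
  induction units with
  | nil => intro out L; simp [pvLeadLoop, pvAccum]
  | cons u rest ih =>
      intro out L
      simp only [pvLeadLoop, List.map_cons, pvAccum, List.takeWhile]
      by_cases h : L + pvWc u ≤ B
      · simp [h, ih, List.take_succ_cons, List.append_assoc]
      · simp [h]

theorem pvAccum_length (s : Int) (w : List Int) : (pvAccum s w).length = w.length := by
  induction w generalizing s with
  | nil => simp [pvAccum]
  | cons x xs ih => simp [pvAccum, ih]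

theorem pvAccum_ge (s : Int) (w : List Int) (hw : ∀ x ∈ w, 0 ≤ x) :
    ∀ c ∈ pvAccum s w, s ≤ c := by
  induction w generalizing s with
  | nil => simp [pvAccum]
  | cons x xs ih =>
      intro c hc
      simp only [pvAccum, List.mem_cons] at hc
      have hx : 0 ≤ x := hw x (by simp)
      rcases hc with h | h
      · omega
      · have := ih (s + x) (fun y hy => hw y (by simp [hy])) c h
        omega

-- characterization: for 1 ≤ m ≤ |w|, pre[m] ≤ B iff m ≤ greedy prefix length
theorem pvAccum_char (w : List Int) (B : Int) :
    ∀ (s : Int) (m : Nat), (∀ x ∈ w, 0 ≤ x) → 1 ≤ m → m ≤ w.length →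
      ((pvAccum s w).getD (m - 1) 0 ≤ B ↔
        m ≤ ((pvAccum s w).takeWhile (fun c => decide (c ≤ B))).length) := by
  induction w with
  | nil => intro s m _ h1 h2; simp at h2; omega
  | cons x xs ih =>
      intro s m hw h1 h2
      have hx : 0 ≤ x := hw x (by simp)
      simp only [pvAccum, List.takeWhile_cons]
      by_cases hb : s + x ≤ B
      · simp only [hb, decide_true, if_true, List.length_cons]
        by_cases hm : m = 1
        · subst hm; simp [hb]
        · have hm2 : 2 ≤ m := by omega
          have hget : ((s + x) :: pvAccum (s + x) xs).getD (m - 1) 0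
              = (pvAccum (s + x) xs).getD (m - 2) 0 := by
            have : m - 1 = (m - 2) + 1 := by omega
            rw [this]; simp
          rw [hget]
          have hxs : m - 1 ≤ xs.length := by simp at h2; omega
          have := ih (s + x) (m - 1) (fun y hy => hw y (by simp [hy])) (by omega) hxs
          have hm1 : m - 1 - 1 = m - 2 := by omega
          rw [hm1] at this
          rw [this]
          omega
      · simp only [hb, decide_false, Bool.false_eq_true, if_false, List.length_nil]
        constructor
        · intro hle
          exfalso
          have hlen : m - 1 < ((s + x) :: pvAccum (s + x) xs).length := by
            simp only [List.length_cons, pvAccum_length]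
            simp at h2; omega
          have hmem : ((s + x) :: pvAccum (s + x) xs).getD (m - 1) 0
              ∈ (s + x) :: pvAccum (s + x) xs := by
            rw [List.getD_eq_getElem _ _ hlen]
            exact List.getElem_mem hlen
          have hge : ∀ c ∈ (s + x) :: pvAccum (s + x) xs, s + x ≤ c := by
            intro c hc
            rcases List.mem_cons.mp hc with hc | hc
            · exact hc ▸ le_refl _
            · exact pvAccum_ge (s + x) xs (fun y hy => hw y (by simp [hy])) c hc
          have := hge _ hmem
          omega
        · intro hle; omega

-- the binary search finds N given the monotone characterization
theorem pvBSGo_eq (pre : List Int) (B : Int) (N L : Nat)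
    (hchar : ∀ m, 1 ≤ m → m ≤ L → (pre.getD m 0 ≤ B ↔ m ≤ N)) :
    ∀ (fuel lo hi : Nat), hi - lo ≤ fuel → lo ≤ N → N ≤ hi → hi ≤ L →
      pvBSGo pre B fuel lo hi = N := by
  intro fuel
  induction fuel with
  | zero => intro lo hi hf hlo hhi _; simp only [pvBSGo]; omega
  | succ fuel ih =>
      intro lo hi hf hlo hhi hL
      simp only [pvBSGo]
      by_cases h : lo < hi
      · rw [if_pos h]
        set mid := (lo + hi + 1) / 2 with hmid
        have h1 : lo < mid ∧ mid ≤ hi := by constructor <;> omega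
        by_cases hb : pre.getD mid 0 ≤ B
        · rw [if_pos hb]
          have := (hchar mid (by omega) (by omega)).mp hb
          exact ih mid hi (by omega) this hhi hL
        · rw [if_neg hb]
          have hNm : ¬ mid ≤ N := fun hc => hb ((hchar mid (by omega) (by omega)).mpr hc)
          exact ih lo (mid - 1) (by omega) hlo (by omega) (by omega)
      · rw [if_neg h]
        omega

theorem pvBS_eq (pre : List Int) (B : Int) (N L : Nat)
    (hchar : ∀ m, 1 ≤ m → m ≤ L → (pre.getD m 0 ≤ B ↔ m ≤ N)) :
    ∀ (lo hi : Nat), lo ≤ N → N ≤ hi → hi ≤ L → pvBS pre B lo hi = N := by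
  intro lo hi hlo hhi hL
  exact pvBSGo_eq pre B N L hchar (hi - lo) lo hi le_rfl hlo hhi hL

theorem pvTakeWhile_len_le (p : Int → Bool) (l : List Int) : (l.takeWhile p).length ≤ l.length := by
  induction l with
  | nil => simp
  | cons x xs ih =>
      simp only [List.takeWhile]
      split
      · simp only [List.length_cons]; omega
      · simp

theorem pvPreFrom_eq (s : Int) (units : List String) :
    pvPreFrom s units = s :: pvAccum s (units.map pvWc) := by
  induction units generalizing s with
  | nil => simp [pvPreFrom, pvAccum]
  | cons u rest ih => simp [pvPreFrom, pvAccum, ih]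

theorem pvWc_nonneg (u : String) : 0 ≤ pvWc u := by
  simp [pvWc]

-- ===== VERDICT (by name: the statement is the Claim_ definition above) =====
theorem lead_selector_spec : Claim_equal_lead_selector := by
  intro units B _
  show lead_selector units B = lead_selector_alt units B
  have hw : ∀ x ∈ units.map pvWc, 0 ≤ x := by
    intro x hx
    rcases List.mem_map.mp hx with ⟨u, _, rfl⟩
    exact pvWc_nonneg u
  set N := ((pvAccum 0 (units.map pvWc)).takeWhile (fun c => decide (c ≤ B))).length with hN
  have hNle : N ≤ units.length := by
    calc N ≤ (pvAccum 0 (units.map pvWc)).length := pvTakeWhile_len_le _ _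
      _ = units.length := by rw [pvAccum_length]; simp
  have hbs : pvBS (pvPreFrom 0 units) B 0 units.length = N := by
    apply pvBS_eq (pvPreFrom 0 units) B N units.length
    · intro m h1 h2
      rw [pvPreFrom_eq]
      have : ((0 : Int) :: pvAccum 0 (units.map pvWc)).getD m 0
          = (pvAccum 0 (units.map pvWc)).getD (m - 1) 0 := by
        have hm : m = (m - 1) + 1 := by omega
        rw [hm]; simp
      rw [this, hN]
      exact pvAccum_char (units.map pvWc) B 0 m (by simpa using hw) h1 (by simpa using h2)
    · omega
    · exact hNle
    · omega
  simp only [lead_selector, lead_selector_alt, hbs, pvLeadLoop_eq, List.nil_append, hN]
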